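-- pv_equiv track=rewrite | github.com/OrdinarilySam/cli-wordle-clone | wordle.py | check_letters
-- ===== SOURCE A (Python) =====
-- def check_letters(clues, yes_lets):
--     '''
--     This function uses sets to remove duplicates and adds all the letters from the clues to each of the
--     sets. Since green and yellow letters take priority over grey letters (if you have two letters and one is in the
--     word, you want to mark that one known), the grey letters are the set difference between the grey letters and the
--     set of the union of the green and yellow letters.
--     '''
--     green_letters = set([])
--     yellow_letters = set([])
--     grey_letters = set([])
--
--     for clue in clues:
--         for idx, letter in enumerate(clue[0]):
--
--             match clue[1][idx]:
--                 case 'green':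
--                     green_letters.add(letter)
--                 case 'yellow':
--                     yellow_letters.add(letter)
--                 case 'grey':
--                     grey_letters.add(letter)
--
--     yes_letters = sorted( list( green_letters.union(yellow_letters) ) )
--     no_letters = sorted( list( grey_letters.difference( green_letters.union(yellow_letters) ) ) )
--
--     if yes_lets:
--         return "".join(yes_letters).upper()
--     else:
--         return "".join(no_letters).upper()
-- ===== SOURCE B (Python) =====
-- def check_letters(clues, yes_lets):
--     # Flatten the clues once, then decide each candidate letter by a direct
--     # predicate scan over the flat pair list (no incremental set/dict state).
--     pairs = [(letter, labels[i]) for word, labels in clues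
--              for i, letter in enumerate(word)]
--
--     def is_yes(l):
--         return any(c == l and s in ('green', 'yellow') for c, s in pairs)
--
--     def is_grey(l):
--         return any(c == l and s == 'grey' for c, s in pairs)
--
--     letters = sorted({c for c, s in pairs if s in ('green', 'yellow', 'grey')})
--     if yes_lets:
--         keep = [l for l in letters if is_yes(l)]
--     else:
--         keep = [l for l in letters if is_grey(l) and not is_yes(l)]
--     return ''.join(keep).upper()
-- ===== Notes on version B (the rewrite author's own statement) =====
-- stated objective: alternative
-- what changed: B keeps no incremental set/dict state at all: it flattens the clues into one (letter,label) pair list, takes the sorted distinct labelled letters, and selects each letter by a direct any()-predicate scan of the pair list (green/yellow for yes; grey-and-not-yes for no), trading A's O(L) three-set aggregation for per-letter rescans.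
import Mathlib
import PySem

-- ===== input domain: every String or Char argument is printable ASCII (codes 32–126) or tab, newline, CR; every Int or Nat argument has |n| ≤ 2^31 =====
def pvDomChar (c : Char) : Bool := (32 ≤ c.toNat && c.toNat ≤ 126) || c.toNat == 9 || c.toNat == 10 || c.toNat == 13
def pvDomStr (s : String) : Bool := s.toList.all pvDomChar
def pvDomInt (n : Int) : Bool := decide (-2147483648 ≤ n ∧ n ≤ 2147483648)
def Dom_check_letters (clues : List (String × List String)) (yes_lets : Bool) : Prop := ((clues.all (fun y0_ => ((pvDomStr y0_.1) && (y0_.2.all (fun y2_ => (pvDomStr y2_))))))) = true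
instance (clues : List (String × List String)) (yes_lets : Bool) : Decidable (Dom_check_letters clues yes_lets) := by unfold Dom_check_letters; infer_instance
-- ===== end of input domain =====

-- B keeps no incremental set/dict state: it flattens the clues into one pair list and
-- decides each sorted distinct letter by a direct predicate scan (objective: alternative).

-- ===== PORT A =====
-- the match statement over clue[1][idx]
def pvMatchA (st : PySem.Set Char × PySem.Set Char × PySem.Set Char) (letter : Char) (lab : String) :
    PySem.Set Char × PySem.Set Char × PySem.Set Char :=
  if lab == "green" then (PySem.Set.add st.1 letter, st.2.1, st.2.2)
  else if lab == "yellow" then (st.1, PySem.Set.add st.2.1 letter, st.2.2)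
  else if lab == "grey" then (st.1, st.2.1, PySem.Set.add st.2.2 letter)
  else st

def check_letters (clues : List (String × List String)) (yes_lets : Bool) : String :=
  let final := clues.foldl (fun st clue =>
      (PySem.List.enumerate clue.1.toList 0).foldl (fun st p =>
        match PySem.List.pyGet? clue.2 p.1 with   -- clue[1][idx]; none = IndexError, excluded by Pre_
        | some lab => pvMatchA st p.2 lab
        | none => st) st)
    (PySem.Set.empty, PySem.Set.empty, PySem.Set.empty)
  let yes_letters := PySem.List.sorted (PySem.Set.union final.1 final.2.1) (fun x => x) false
  let no_letters := PySem.List.sorted (PySem.Set.diff final.2.2 (PySem.Set.union final.1 final.2.1)) (fun x => x) false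
  if yes_lets then PySem.Str.upper (String.ofList yes_letters)
  else PySem.Str.upper (String.ofList no_letters)

-- ===== PORT B =====
-- the flattening comprehension; labels[i] raises IndexError when labels is short
-- (pyGet? = none there): those inputs are excluded by Pre_, the filterMap skips them
def pvPairs (clues : List (String × List String)) : List (Char × String) :=
  clues.flatMap (fun clue =>
    (PySem.List.enumerate clue.1.toList 0).filterMap (fun p =>
      (PySem.List.pyGet? clue.2 p.1).map (fun lab => (p.2, lab))))

def pvIsYes (pairs : List (Char × String)) (l : Char) : Bool :=
  pairs.any (fun p => p.1 == l && (p.2 == "green" || p.2 == "yellow"))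

def pvIsGrey (pairs : List (Char × String)) (l : Char) : Bool :=
  pairs.any (fun p => p.1 == l && p.2 == "grey")

def check_letters_alt (clues : List (String × List String)) (yes_lets : Bool) : String :=
  let pairs := pvPairs clues
  let letters := PySem.List.sorted
    (PySem.Set.ofList (pairs.filterMap (fun p =>
      if p.2 == "green" || p.2 == "yellow" || p.2 == "grey" then some p.1 else none)))
    (fun x => x) false
  let keep := if yes_lets then letters.filter (pvIsYes pairs)
              else letters.filter (fun l => pvIsGrey pairs l && !(pvIsYes pairs l))
  PySem.Str.upper (String.ofList keep)

-- ===== PRECONDITION & SPEC =====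
-- Pre_ excludes exactly the inputs where some clue's label list is shorter than its word:
-- there both A and B raise IndexError at clue[1][idx] / labels[i].
def Pre_check_letters (clues : List (String × List String)) (yes_lets : Bool) : Prop :=
  ∀ c ∈ clues, c.1.toList.length ≤ c.2.length
instance (clues : List (String × List String)) (yes_lets : Bool) : Decidable (Pre_check_letters clues yes_lets) := by unfold Pre_check_letters; infer_instance
def pvWitness_check_letters : (List (String × List String)) × Bool := ([("ab", ["green", "grey"])], true)

def Spec_check_letters (clues : List (String × List String)) (yes_lets : Bool) (out : String) : Prop := out = check_letters_alt clues yes_lets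
instance (clues : List (String × List String)) (yes_lets : Bool) (out : String) : Decidable (Spec_check_letters clues yes_lets out) := by unfold Spec_check_letters; infer_instance

-- ===== CLAIM (what is proved, stated in full; the proofs are below) =====
def Claim_equal_check_letters : Prop := ∀ (clues : List (String × List String)) (yes_lets : Bool), Dom_check_letters clues yes_lets → Pre_check_letters clues yes_lets → Spec_check_letters clues yes_lets (check_letters clues yes_lets)

-- ===== LEMMAS AND PROOFS =====

-- A's enumerate/pyGet? inner loop equals a fold over zip when the labels are long enough
theorem pvEnum_zip {σ : Type} (cs : List Char) (labels : List String) (s : Nat)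
    (h : s + cs.length ≤ labels.length)
    (f : σ → Char → String → σ) (init : σ) :
    (PySem.List.enumerate cs (s : Int)).foldl (fun st p =>
        match PySem.List.pyGet? labels p.1 with
        | some lab => f st p.2 lab
        | none => st) init
      = (cs.zip (labels.drop s)).foldl (fun st p => f st p.1 p.2) init := by
  induction cs generalizing s init with
  | nil => simp [PySem.List.enumerate_nil]
  | cons c cs ih =>
      have hs : s < labels.length := by simp at h; omega
      rw [PySem.List.enumerate_cons, List.foldl_cons]
      have hdrop : labels.drop s = labels[s] :: labels.drop (s + 1) :=
        (List.getElem_cons_drop hs).symm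
      rw [hdrop, List.zip_cons_cons, List.foldl_cons]
      have h1 : PySem.List.pyGet? labels (s : Int) = some labels[s] := by
        simp [PySem.List.pyGet?_natCast, List.getElem?_eq_getElem hs]
      rw [h1]
      have : ((s : Int) + 1) = ((s + 1 : Nat) : Int) := by push_cast; ring
      rw [this, ih (s + 1) (by simp at h ⊢; omega)]

-- B's flattening comprehension equals the zip when the labels are long enough
theorem pvEnumFM_zip (cs : List Char) (labels : List String) (s : Nat)
    (h : s + cs.length ≤ labels.length) :
    (PySem.List.enumerate cs (s : Int)).filterMap (fun p =>
        (PySem.List.pyGet? labels p.1).map (fun lab => (p.2, lab)))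
      = cs.zip (labels.drop s) := by
  induction cs generalizing s with
  | nil => simp [PySem.List.enumerate_nil]
  | cons c cs ih =>
      have hs : s < labels.length := by simp at h; omega
      rw [PySem.List.enumerate_cons, List.filterMap_cons]
      have hdrop : labels.drop s = labels[s] :: labels.drop (s + 1) :=
        (List.getElem_cons_drop hs).symm
      have h1 : PySem.List.pyGet? labels (s : Int) = some labels[s] := by
        simp [PySem.List.pyGet?_natCast, List.getElem?_eq_getElem hs]
      rw [hdrop, List.zip_cons_cons, h1]
      have h2 : ((s : Int) + 1) = ((s + 1 : Nat) : Int) := by push_cast; ring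
      simp only [Option.map_some]
      rw [h2, ih (s + 1) (by simp at h ⊢; omega)]

theorem pvFoldl_flatMap {α β σ : Type} (l : List α) (g : α → List β) (f : σ → β → σ) (init : σ) :
    (l.flatMap g).foldl f init = l.foldl (fun acc x => (g x).foldl f acc) init := by
  induction l generalizing init with
  | nil => rfl
  | cons a t ih => simp only [List.flatMap_cons, List.foldl_append, List.foldl_cons, ih]

-- the four cases of A's match statement
theorem pvMatchA_green (st : PySem.Set Char × PySem.Set Char × PySem.Set Char) (c : Char) :
    pvMatchA st c "green" = (PySem.Set.add st.1 c, st.2.1, st.2.2) := by simp [pvMatchA]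

theorem pvMatchA_yellow (st : PySem.Set Char × PySem.Set Char × PySem.Set Char) (c : Char) :
    pvMatchA st c "yellow" = (st.1, PySem.Set.add st.2.1 c, st.2.2) := by simp [pvMatchA]

theorem pvMatchA_grey (st : PySem.Set Char × PySem.Set Char × PySem.Set Char) (c : Char) :
    pvMatchA st c "grey" = (st.1, st.2.1, PySem.Set.add st.2.2 c) := by simp [pvMatchA]

theorem pvMatchA_other (st : PySem.Set Char × PySem.Set Char × PySem.Set Char) (c : Char)
    (lab : String) (h1 : lab ≠ "green") (h2 : lab ≠ "yellow") (h3 : lab ≠ "grey") :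
    pvMatchA st c lab = st := by simp [pvMatchA, h1, h2, h3]

-- membership after A's three-set fold over a flat pair list
theorem pvFold_char (pairs : List (Char × String))
    (st : PySem.Set Char × PySem.Set Char × PySem.Set Char) (k : Char) :
    (k ∈ (pairs.foldl (fun st p => pvMatchA st p.1 p.2) st).1 ↔ k ∈ st.1 ∨ (k, "green") ∈ pairs) ∧
    (k ∈ (pairs.foldl (fun st p => pvMatchA st p.1 p.2) st).2.1 ↔ k ∈ st.2.1 ∨ (k, "yellow") ∈ pairs) ∧
    (k ∈ (pairs.foldl (fun st p => pvMatchA st p.1 p.2) st).2.2 ↔ k ∈ st.2.2 ∨ (k, "grey") ∈ pairs) := by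
  induction pairs generalizing st with
  | nil => simp
  | cons p t ih =>
      obtain ⟨c, lab⟩ := p
      simp only [List.foldl_cons, List.mem_cons, Prod.mk.injEq]
      obtain ⟨i1, i2, i3⟩ := ih (pvMatchA st c lab)
      rw [i1, i2, i3]
      by_cases h1 : lab = "green"
      · subst h1
        rw [pvMatchA_green]
        simp only [PySem.Set.mem_add]
        refine ⟨?_, ?_, ?_⟩ <;> simp [or_assoc]
      · by_cases h2 : lab = "yellow"
        · subst h2
          rw [pvMatchA_yellow]
          simp only [PySem.Set.mem_add]
          refine ⟨?_, ?_, ?_⟩ <;> simp [or_assoc]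
        · by_cases h3 : lab = "grey"
          · subst h3
            rw [pvMatchA_grey]
            simp only [PySem.Set.mem_add]
            refine ⟨?_, ?_, ?_⟩ <;> simp [or_assoc]
          · rw [pvMatchA_other _ _ _ h1 h2 h3]
            have e1 : ¬ ("green" = lab) := fun h => h1 h.symm
            have e2 : ¬ ("yellow" = lab) := fun h => h2 h.symm
            have e3 : ¬ ("grey" = lab) := fun h => h3 h.symm
            refine ⟨?_, ?_, ?_⟩ <;> simp [e1, e2, e3]

-- nodup is preserved by A's fold
theorem pvFold_nodup (pairs : List (Char × String))
    (st : PySem.Set Char × PySem.Set Char × PySem.Set Char)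
    (h : st.1.Nodup ∧ st.2.1.Nodup ∧ st.2.2.Nodup) :
    (pairs.foldl (fun st p => pvMatchA st p.1 p.2) st).1.Nodup ∧
    (pairs.foldl (fun st p => pvMatchA st p.1 p.2) st).2.1.Nodup ∧
    (pairs.foldl (fun st p => pvMatchA st p.1 p.2) st).2.2.Nodup := by
  induction pairs generalizing st with
  | nil => exact h
  | cons p t ih =>
      obtain ⟨hg, hy, hgr⟩ := h
      obtain ⟨c, lab⟩ := p
      refine ih _ ?_
      dsimp only
      by_cases h1 : lab = "green"
      · subst h1; rw [pvMatchA_green]; exact ⟨PySem.Set.nodup_add _ _ hg, hy, hgr⟩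
      · by_cases h2 : lab = "yellow"
        · subst h2; rw [pvMatchA_yellow]; exact ⟨hg, PySem.Set.nodup_add _ _ hy, hgr⟩
        · by_cases h3 : lab = "grey"
          · subst h3; rw [pvMatchA_grey]; exact ⟨hg, hy, PySem.Set.nodup_add _ _ hgr⟩
          · rw [pvMatchA_other _ _ _ h1 h2 h3]; exact ⟨hg, hy, hgr⟩

-- sorted(S) equals the pred-filter of the sorted distinct candidate letters
theorem pvSortedFilter (S : List Char) (hS : S.Nodup) (all : List Char) (pred : Char → Bool)
    (hmem : ∀ k, k ∈ S ↔ pred k = true)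
    (hall : ∀ k, pred k = true → k ∈ all) :
    PySem.List.sorted S (fun x => x) false
      = (PySem.List.sorted (PySem.Set.ofList all) (fun x => x) false).filter pred := by
  apply PySem.List.sorted_eq_of_perm_of_pairwise_lt
  · have hpw := PySem.List.sorted_ofList_pairwise_lt (xs := all)
    have hnd : ((PySem.List.sorted (PySem.Set.ofList all) (fun x => x) false).filter pred).Nodup :=
      ((hpw.imp fun h => ne_of_lt h).filter pred)
    refine (List.perm_ext_iff_of_nodup hnd hS).mpr ?_
    intro k
    rw [List.mem_filter, PySem.List.mem_sorted, PySem.Set.mem_ofList, hmem k]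
    exact ⟨fun h => h.2, fun h => ⟨hall k h, h⟩⟩
  · exact (PySem.List.sorted_ofList_pairwise_lt (xs := all)).filter pred

theorem pvPairs_eq (clues : List (String × List String))
    (hpre : ∀ c ∈ clues, c.1.toList.length ≤ c.2.length) :
    pvPairs clues = clues.flatMap (fun clue => clue.1.toList.zip clue.2) := by
  unfold pvPairs
  induction clues with
  | nil => rfl
  | cons c t ih =>
      simp only [List.flatMap_cons]
      have h := pvEnumFM_zip c.1.toList c.2 0 (by simpa using hpre c List.mem_cons_self)
      rw [List.drop_zero, Nat.cast_zero] at h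
      rw [h, ih (fun d hd => hpre d (List.mem_cons_of_mem _ hd))]

-- ===== VERDICT (by name: the statement is the Claim_ definition above) =====
theorem check_letters_spec : Claim_equal_check_letters := by
  intro clues yl hdom hpre
  unfold Spec_check_letters check_letters check_letters_alt
  -- the flat pair list both sides reduce to
  set pairs0 := clues.flatMap (fun clue => clue.1.toList.zip clue.2) with hp0
  have hpairs := pvPairs_eq clues hpre
  rw [← hp0] at hpairs
  -- A's nested fold is the fold over pairs0
  have hA : clues.foldl (fun st clue =>
      (PySem.List.enumerate clue.1.toList 0).foldl (fun st p =>
        match PySem.List.pyGet? clue.2 p.1 with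
        | some lab => pvMatchA st p.2 lab
        | none => st) st)
      ((PySem.Set.empty : PySem.Set Char), (PySem.Set.empty : PySem.Set Char),
        (PySem.Set.empty : PySem.Set Char))
    = pairs0.foldl (fun st p => pvMatchA st p.1 p.2)
        (PySem.Set.empty, PySem.Set.empty, PySem.Set.empty) := by
    rw [hp0, pvFoldl_flatMap]
    apply PySem.List.foldl_congr_mem
    intro st clue hc
    have h0 := pvEnum_zip clue.1.toList clue.2 0 (by simpa using hpre clue hc)
      (fun st c lab => pvMatchA st c lab) st
    simpa using h0
  rw [hA, hpairs]
  set stA := pairs0.foldl (fun st p => pvMatchA st p.1 p.2)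
    ((PySem.Set.empty : PySem.Set Char), (PySem.Set.empty : PySem.Set Char),
      (PySem.Set.empty : PySem.Set Char)) with hstA
  have hchar := fun k => pvFold_char pairs0
    (PySem.Set.empty, PySem.Set.empty, PySem.Set.empty) k
  have hnd := pvFold_nodup pairs0 (PySem.Set.empty, PySem.Set.empty, PySem.Set.empty)
    ⟨List.nodup_nil, List.nodup_nil, List.nodup_nil⟩
  rw [← hstA] at hchar hnd
  have hyes : ∀ k, k ∈ PySem.Set.union stA.1 stA.2.1 ↔ pvIsYes pairs0 k = true := by
    intro k
    rw [PySem.Set.mem_union, (hchar k).1, (hchar k).2.1]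
    simp only [PySem.Set.empty, List.not_mem_nil, false_or]
    unfold pvIsYes
    rw [List.any_eq_true]
    constructor
    · rintro (h | h)
      · exact ⟨(k, "green"), h, by simp⟩
      · exact ⟨(k, "yellow"), h, by simp⟩
    · rintro ⟨⟨c, lab⟩, hmem, hp⟩
      simp only [Bool.and_eq_true, Bool.or_eq_true, beq_iff_eq] at hp
      obtain ⟨rfl, (rfl | rfl)⟩ := hp
      · exact Or.inl hmem
      · exact Or.inr hmem
  have hgrey : ∀ k, k ∈ stA.2.2 ↔ pvIsGrey pairs0 k = true := by
    intro k
    rw [(hchar k).2.2]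
    simp only [PySem.Set.empty, List.not_mem_nil, false_or]
    unfold pvIsGrey
    rw [List.any_eq_true]
    constructor
    · intro h; exact ⟨(k, "grey"), h, by simp⟩
    · rintro ⟨⟨c, lab⟩, hmem, hp⟩
      simp only [Bool.and_eq_true, beq_iff_eq] at hp
      obtain ⟨rfl, rfl⟩ := hp
      exact hmem
  have hallmem : ∀ (k : Char) (lab : String), (k, lab) ∈ pairs0 →
      (lab = "green" ∨ lab = "yellow" ∨ lab = "grey") →
      k ∈ pairs0.filterMap (fun p =>
        if p.2 == "green" || p.2 == "yellow" || p.2 == "grey" then some p.1 else none) := by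
    intro k lab hmem hlab
    rw [List.mem_filterMap]
    refine ⟨(k, lab), hmem, ?_⟩
    rcases hlab with rfl | rfl | rfl <;> simp
  cases yl with
  | true =>
      simp only [if_true]
      rw [pvSortedFilter (PySem.Set.union stA.1 stA.2.1)
        (PySem.Set.nodup_union _ _ hnd.1) _ (pvIsYes pairs0) hyes ?_]
      intro k hk
      unfold pvIsYes at hk
      rw [List.any_eq_true] at hk
      obtain ⟨⟨c, lab⟩, hmem, hp⟩ := hk
      simp only [Bool.and_eq_true, Bool.or_eq_true, beq_iff_eq] at hp
      obtain ⟨rfl, h⟩ := hp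
      exact hallmem c lab hmem (by tauto)
  | false =>
      simp only [Bool.false_eq_true, if_false]
      rw [pvSortedFilter (PySem.Set.diff stA.2.2 (PySem.Set.union stA.1 stA.2.1))
        (PySem.Set.nodup_diff _ _ hnd.2.2) _
        (fun l => pvIsGrey pairs0 l && !(pvIsYes pairs0 l)) ?_ ?_]
      · intro k
        rw [PySem.Set.mem_diff, Bool.and_eq_true, Bool.not_eq_true', hgrey k]
        constructor
        · rintro ⟨h1, h2⟩
          refine ⟨h1, ?_⟩
          by_contra hc
          rw [Bool.not_eq_false] at hc
          exact h2 ((hyes k).mpr hc)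
        · rintro ⟨h1, h2⟩
          refine ⟨h1, fun hc => ?_⟩
          rw [(hyes k).mp hc] at h2
          exact absurd h2 (by simp)
      · intro k hk
        rw [Bool.and_eq_true] at hk
        obtain ⟨hk, -⟩ := hk
        unfold pvIsGrey at hk
        rw [List.any_eq_true] at hk
        obtain ⟨⟨c, lab⟩, hmem, hp⟩ := hk
        simp only [Bool.and_eq_true, beq_iff_eq] at hp
        obtain ⟨rfl, rfl⟩ := hp
        exact hallmem c "grey" hmem (by tauto)
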